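-- pv_equiv track=rewrite | github.com/datacommonsorg/data | scripts/us_census/acs5yr/subject_tables/common/helper_functions.py | get_columns_by_token_count
-- ===== SOURCE A (Python) =====
-- def get_columns_by_token_count(column_list: list,
--                                delimiter: str = '!!') -> dict:
--     ret_dict = {}
--     for cur_column in column_list:
--         token_list = cur_column.split(delimiter)
--         if len(token_list) not in ret_dict:
--             ret_dict[len(token_list)] = []
--         ret_dict[len(token_list)].append(cur_column)
--     return ret_dict
-- ===== SOURCE B (Python) =====
-- def get_columns_by_token_count(column_list: list,
--                                delimiter: str = '!!') -> dict:
--     counts = [len(c.split(delimiter)) for c in column_list]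
--     return {k: [c for c, n in zip(column_list, counts) if n == k]
--             for k in dict.fromkeys(counts)}
-- ===== Notes on version B (the rewrite author's own statement) =====
-- stated objective: simpler
-- what changed: Replaces the mutate-a-dict-inside-a-loop accumulation with a two-phase pipeline: compute all token counts once, then build the result as a dict comprehension that filters the columns per distinct count (dict.fromkeys keeps first-occurrence key order).
import Mathlib
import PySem

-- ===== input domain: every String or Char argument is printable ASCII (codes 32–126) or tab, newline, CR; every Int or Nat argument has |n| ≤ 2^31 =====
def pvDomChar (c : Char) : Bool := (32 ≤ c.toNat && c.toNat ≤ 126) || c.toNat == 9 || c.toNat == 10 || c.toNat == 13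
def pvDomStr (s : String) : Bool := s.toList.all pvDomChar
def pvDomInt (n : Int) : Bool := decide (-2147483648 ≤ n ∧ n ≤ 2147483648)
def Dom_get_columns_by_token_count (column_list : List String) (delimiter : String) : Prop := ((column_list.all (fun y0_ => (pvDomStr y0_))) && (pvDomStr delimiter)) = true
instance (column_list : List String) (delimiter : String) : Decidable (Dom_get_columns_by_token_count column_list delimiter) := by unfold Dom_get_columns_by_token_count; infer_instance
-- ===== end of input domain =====

-- B replaces A's mutate-a-dict-in-a-loop accumulation by a two-phase pipeline (compute all token
-- counts, then a per-distinct-count filtering dict comprehension); objective: simpler, same results.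


-- ===== PORT A =====
-- A: loop, per column: split, insert [] if the count key is new, then append the column at the key.
def get_columns_by_token_count (column_list : List String) (delimiter : String) : List (Int × List String) :=
  (column_list.foldl (fun ret_dict cur_column =>
      let token_list := (PySem.Str.split? cur_column delimiter).getD []
      let n : Int := token_list.length
      let ret_dict := if ret_dict.contains n then ret_dict else ret_dict.insert n []
      ret_dict.modify n [] (fun l => l ++ [cur_column]))
    PySem.Dict.empty).items

-- ===== PORT B =====
-- B: counts = [len(c.split(delimiter)) for c in column_list];
--    {k: [c for c, n in zip(column_list, counts) if n == k] for k in dict.fromkeys(counts)}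
def get_columns_by_token_count_alt (column_list : List String) (delimiter : String) : List (Int × List String) :=
  let counts : List Int := column_list.map (fun c => (((PySem.Str.split? c delimiter).getD []).length : Int))
  (PySem.List.dedup counts).map (fun k =>
    (k, (column_list.zip counts).filterMap (fun p => if p.2 == k then some p.1 else none)))

-- ===== PRECONDITION & SPEC =====
-- Pre_ excludes only the inputs where both programs raise ValueError: a nonempty column list with
-- an empty delimiter (str.split('') raises).
def Pre_get_columns_by_token_count (column_list : List String) (delimiter : String) : Prop :=
  column_list = [] ∨ delimiter ≠ ""
instance (column_list : List String) (delimiter : String) : Decidable (Pre_get_columns_by_token_count column_list delimiter) := by unfold Pre_get_columns_by_token_count; infer_instance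
def pvWitness_get_columns_by_token_count : List String × String := (["a!!b", "c", "x!!y!!z"], "!!")
def Spec_get_columns_by_token_count (column_list : List String) (delimiter : String) (out : List (Int × List String)) : Prop := out = get_columns_by_token_count_alt column_list delimiter
instance (column_list : List String) (delimiter : String) (out : List (Int × List String)) : Decidable (Spec_get_columns_by_token_count column_list delimiter out) := by unfold Spec_get_columns_by_token_count; infer_instance

-- ===== CLAIM (what is proved, stated in full; the proofs are below) =====
def Claim_equal_get_columns_by_token_count : Prop := ∀ (column_list : List String) (delimiter : String), Dom_get_columns_by_token_count column_list delimiter → Pre_get_columns_by_token_count column_list delimiter → Spec_get_columns_by_token_count column_list delimiter (get_columns_by_token_count column_list delimiter)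

-- ===== LEMMAS AND PROOFS =====

-- A's "insert [] if missing, then append" step is exactly a modify with default [].
lemma step_eq_modify (d : PySem.Dict Int (List String)) (n : Int) (c : String) :
    (if d.contains n then d else d.insert n []).modify n [] (fun l => l ++ [c])
      = d.modify n [] (fun l => l ++ [c]) := by
  by_cases h : d.contains n
  · simp [h]
  · have h' : d.contains n = false := by simpa using h
    simp [h', PySem.Dict.modify, PySem.Dict.getD_insert_self,
      PySem.Dict.getD_of_not_contains d ([] : List String) h',
      PySem.Dict.insert_insert_self]

-- the zip-comprehension in B filters the columns by their token count
lemma zip_filterMap (f : String → Int) (k : Int) (cl : List String) :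
    (cl.zip (cl.map f)).filterMap (fun p => if p.2 == k then some p.1 else none)
      = cl.filter (fun c => f c == k) := by
  induction cl with
  | nil => rfl
  | cons c t ih =>
      simp only [List.map_cons, List.zip_cons_cons, List.filterMap_cons, List.filter_cons, ih]
      by_cases h : f c == k
      · simp [h]
      · simp [h]

theorem get_columns_by_token_count_spec : Claim_equal_get_columns_by_token_count := by
  intro cl delim _ _
  unfold Spec_get_columns_by_token_count get_columns_by_token_count get_columns_by_token_count_alt
  set key : String → Int := fun c => (((PySem.Str.split? c delim).getD []).length : Int) with hkey
  -- collapse A's two-step body into a single modify keyed by `key`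
  have hbody :
      cl.foldl (fun ret_dict cur_column =>
          let token_list := (PySem.Str.split? cur_column delim).getD []
          let n : Int := token_list.length
          let ret_dict := if ret_dict.contains n then ret_dict else ret_dict.insert n []
          ret_dict.modify n [] (fun l => l ++ [cur_column])) PySem.Dict.empty
        = (cl.map (fun c => (key c, c))).foldl
            (fun d p => d.modify p.1 [] (fun l => l ++ [p.2])) PySem.Dict.empty := by
    rw [List.foldl_map]
    exact PySem.List.foldl_congr_mem _ _ _ _ (fun d c hc => step_eq_modify d (key c) c)
  rw [hbody]
  set pairs := cl.map (fun c => (key c, c)) with hpairs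
  set D := pairs.foldl (fun d p => d.modify p.1 [] (fun l => l ++ [p.2])) PySem.Dict.empty with hD
  have hnd : D.keys.Nodup := by
    rw [hD, hpairs, List.foldl_map]
    exact PySem.Dict.nodup_keys_foldl_modify_key cl key []
      (fun d c => fun l => l ++ [c]) PySem.Dict.empty (by simp [PySem.Dict.keys_empty])
  have hkeys : D.keys = PySem.List.dedup (cl.map key) := by
    rw [hD, hpairs, List.foldl_map]
    rw [PySem.Dict.keys_foldl_modify_key]
    simp [PySem.Dict.keys_empty, PySem.Set.update, PySem.List.dedup_eq_ofList,
      PySem.Set.ofList_eq_foldl]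
  rw [PySem.Dict.items_eq_map_keys D hnd [], hkeys]
  apply List.map_congr_left
  intro k hk
  have hget : D.getD k [] = cl.filter (fun c => key c == k) := by
    rw [hD, PySem.Dict.getD_foldl_modify_append, hpairs]
    simp [List.filter_map, Function.comp_def, List.map_map]
  rw [hget, zip_filterMap key k cl]
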